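-- pv_equiv track=rewrite | github.com/AmirKameel/vibe-coding | agents/frontend.py | _extract_page_name
-- ===== SOURCE A (Python) =====
-- def _extract_page_name(description: str) -> str:
--     """Extract page name from task description"""
--
--     # Try to find page name in the description
--     words = description.split()
--     page_name = "DefaultPage"
--
--     for i, word in enumerate(words):
--         if word.lower() in ["page", "screen", "view"]:
--             if i > 0:
--                 page_name = words[i-1]
--                 # Capitalize first letter
--                 page_name = page_name[0].upper() + page_name[1:]
--                 # Remove any non-alphanumeric characters
--                 page_name = ''.join(c for c in page_name if c.isalnum())
--
--     return page_name
-- ===== SOURCE B (Python) =====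
-- def _extract_page_name(description: str) -> str:
--     """Extract page name from task description (single reverse scan, early exit)."""
--     words = description.split()
--     for i, word in reversed(list(enumerate(words))):
--         if word.lower() in ("page", "screen", "view"):
--             if i > 0:
--                 prev = words[i - 1]
--                 return ''.join(c for c in prev[0].upper() + prev[1:] if c.isalnum())
--             break
--     return "DefaultPage"
-- ===== Notes on version B (the rewrite author's own statement) =====
-- stated objective: alternative
-- what changed: Instead of scanning forward over all words and repeatedly overwriting the accumulator at every keyword so that the last keyword wins, B scans the indexed word list in reverse and returns immediately at the first keyword it meets (which is the last one), so the accumulator variable and the repeated cleaning work disappear.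
import Mathlib
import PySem

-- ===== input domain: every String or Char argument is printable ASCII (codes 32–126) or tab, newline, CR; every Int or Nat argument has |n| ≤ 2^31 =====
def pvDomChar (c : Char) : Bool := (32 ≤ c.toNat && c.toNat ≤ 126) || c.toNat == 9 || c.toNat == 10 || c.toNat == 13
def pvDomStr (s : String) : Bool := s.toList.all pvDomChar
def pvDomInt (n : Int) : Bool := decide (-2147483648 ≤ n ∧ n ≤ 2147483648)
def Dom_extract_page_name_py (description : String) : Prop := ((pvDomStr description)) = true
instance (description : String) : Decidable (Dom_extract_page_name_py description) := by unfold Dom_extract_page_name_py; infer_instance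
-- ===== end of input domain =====

-- B replaces A's forward scan with an accumulator by a reverse scan with an early return
-- at the last keyword (objective: alternative; return values are identical).

-- ===== PORT A =====
-- the keyword list ["page", "screen", "view"] (shared literal of both Pythons)
def pvKeys : List (List Char) := ["page".toList, "screen".toList, "view".toList]

-- page_name[0].upper() + page_name[1:], then keep only alphanumerics (shared literal
-- cleaning expression of both Pythons; the [] branch is unreachable: split() words are nonempty)
def pvClean (p : List Char) : List Char :=
  (match p with
   | [] => []
   | c :: rest => PySem.Chars.upperChar c :: rest).filter PySem.Chars.isalnum

def extract_page_name_py (description : String) : String :=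
  let words := PySem.Chars.split₀ description.toList
  String.ofList ((PySem.List.enumerate words).foldl (fun (acc : List Char) (iw : Int × List Char) =>
    if PySem.Chars.lower iw.2 ∈ pvKeys then
      if 0 < iw.1 then
        match PySem.List.pyGet? words (iw.1 - 1) with
        | some p => pvClean p
        | none => acc      -- unreachable: 0 < i < len(words)
      else acc
    else acc) "DefaultPage".toList)

-- ===== PORT B =====
-- the reverse for-loop of B: first keyword met (from the right) decides; break/return
def pvFindRev (words : List (List Char)) : List (Int × List Char) → List Char
  | [] => "DefaultPage".toList
  | iw :: rest =>
    if PySem.Chars.lower iw.2 ∈ pvKeys then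
      if 0 < iw.1 then
        match PySem.List.pyGet? words (iw.1 - 1) with
        | some p => pvClean p
        | none => "DefaultPage".toList      -- unreachable: 0 < i < len(words)
      else "DefaultPage".toList
    else pvFindRev words rest

def extract_page_name_py_alt (description : String) : String :=
  let words := PySem.Chars.split₀ description.toList
  String.ofList (pvFindRev words ((PySem.List.enumerate words).reverse))

-- ===== PRECONDITION & SPEC =====
def Spec_extract_page_name_py (description : String) (out : String) : Prop := out = extract_page_name_py_alt description
instance (description : String) (out : String) : Decidable (Spec_extract_page_name_py description out) := by unfold Spec_extract_page_name_py; infer_instance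

-- ===== CLAIM (what is proved, stated in full; the proofs are below) =====
def Claim_equal_extract_page_name_py : Prop := ∀ (description : String), Dom_extract_page_name_py description → Spec_extract_page_name_py description (extract_page_name_py description)

-- ===== LEMMAS AND PROOFS =====

-- the forward fold over `enumerate ws` equals the reverse scan, for any ws no longer
-- than the lookup list W (so every index i-1 with 0 < i hits W)
lemma pv_fold_eq_findRev (W : List (List Char)) (ws : List (List Char))
    (h : ws.length ≤ W.length) :
    (PySem.List.enumerate ws).foldl (fun acc iw =>
      if PySem.Chars.lower iw.2 ∈ pvKeys then
        if 0 < iw.1 then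
          match PySem.List.pyGet? W (iw.1 - 1) with
          | some p => pvClean p
          | none => acc
        else acc
      else acc) "DefaultPage".toList
    = pvFindRev W ((PySem.List.enumerate ws).reverse) := by
  induction ws using List.reverseRecOn with
  | nil => simp [PySem.List.enumerate, pvFindRev]
  | append_singleton ws w ih =>
    have hlen : ws.length ≤ W.length := by simp at h; omega
    rw [PySem.List.enumerate_append]
    simp only [PySem.List.enumerate_cons, PySem.List.enumerate_nil, zero_add]
    rw [List.foldl_append]
    simp only [List.foldl_cons, List.foldl_nil, List.reverse_append, List.reverse_cons,
      List.reverse_nil, List.nil_append, List.cons_append]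
    rw [pvFindRev]
    by_cases hk : PySem.Chars.lower w ∈ pvKeys
    · simp only [hk, if_pos]
      by_cases hpos : 0 < (ws.length : Int)
      · simp only [hpos, if_pos]
        have hg : PySem.List.pyGet? W ((ws.length : Int) - 1) =
            some (W[ws.length - 1]'(by omega)) := by
          have h1 : ((ws.length : Int) - 1) = ((ws.length - 1 : Nat) : Int) := by omega
          rw [h1, PySem.List.pyGet?_natCast]
          exact List.getElem?_eq_getElem (by omega)
        rw [hg]
      · have hz : ws = [] := by
          have : ws.length = 0 := by omega
          exact List.length_eq_zero_iff.mp this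
        subst hz
        simp [PySem.List.enumerate]
    · simp only [hk, if_neg, not_false_iff]
      simpa using ih hlen

-- ===== VERDICT (by name: the statement is the Claim_ definition above) =====
theorem extract_page_name_py_spec : Claim_equal_extract_page_name_py := by
  intro description _
  unfold Spec_extract_page_name_py extract_page_name_py extract_page_name_py_alt
  exact congrArg String.ofList
    (pv_fold_eq_findRev (PySem.Chars.split₀ description.toList)
      (PySem.Chars.split₀ description.toList) le_rfl)
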